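-- pv_equiv track=rewrite | github.com/xpvqx/python | 2024/nik-usb/labbar 5/LABB 5.py | cheapest_3h
-- ===== SOURCE A (Python) =====
-- def cheapest_3h(elec):
--
--
--     biggie = 100000000000
--
--     for i in range(0, len(elec) - 2):
--
--
--
--             nuvarande = elec[i] + elec[i + 1] + elec[i + 2]
--             if nuvarande < biggie:
--                 biggie = nuvarande
--                 timme = i
--     #print (biggie)
--     #print (timme)
--     return timme
-- ===== SOURCE B (Python) =====
-- def cheapest_3h(elec):
--     pre = [0]
--     for x in elec:
--         pre.append(pre[-1] + x)
--     best = None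
--     for i in range(len(elec) - 2):
--         cost = pre[i + 3] - pre[i]
--         if best is None or cost < best:
--             best = cost
--             timme = i
--     return timme
-- ===== Notes on version B (the rewrite author's own statement) =====
-- stated objective: alternative
-- what changed: B first builds a prefix-sum table and computes each 3-hour window cost as a difference of two prefix sums, tracking the minimum with a None-initialized best instead of A's large sentinel constant.
import Mathlib
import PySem

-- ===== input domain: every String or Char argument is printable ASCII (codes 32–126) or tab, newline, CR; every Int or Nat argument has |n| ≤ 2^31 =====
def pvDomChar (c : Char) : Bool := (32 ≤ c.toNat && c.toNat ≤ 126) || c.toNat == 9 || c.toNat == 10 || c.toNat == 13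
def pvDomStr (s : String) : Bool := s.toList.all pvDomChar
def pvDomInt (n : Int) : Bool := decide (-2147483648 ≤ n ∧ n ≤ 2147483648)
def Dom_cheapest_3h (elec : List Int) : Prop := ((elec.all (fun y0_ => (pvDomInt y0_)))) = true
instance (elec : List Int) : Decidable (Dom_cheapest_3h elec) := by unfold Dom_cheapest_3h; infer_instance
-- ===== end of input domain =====

-- B replaces A's explicit three-term window sums by a prefix-sum table (window = difference of
-- two prefix sums) and a None-initialized running minimum instead of A's sentinel constant.

-- ===== PORT A =====
-- literal port of A: range loop, three-element sum, sentinel 100000000000, strict <;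
-- timme is Option Int (none = unbound); indices i, i+1, i+2 are in range for i ∈ range(len-2),
-- where pyGetD is exact.
def cheapest_3h (elec : List Int) : Int :=
  let st := (PySem.List.pyRange 0 ((elec.length : Int) - 2) 1).foldl
    (fun (st : Int × Option Int) i =>
      let nuvarande := PySem.List.pyGetD elec i 0 + PySem.List.pyGetD elec (i + 1) 0 +
        PySem.List.pyGetD elec (i + 2) 0
      if nuvarande < st.1 then (nuvarande, some i) else st)
    (100000000000, none)
  st.2.getD 0  -- none would be Python's UnboundLocalError; excluded by Pre_

-- ===== PORT B =====
-- pre = [0]; for x in elec: pre.append(pre[-1] + x)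
def buildPre (elec : List Int) : List Int :=
  elec.foldl (fun pre x => pre ++ [PySem.List.pyGetD pre (-1) 0 + x]) [0]

def cheapest_3h_alt (elec : List Int) : Int :=
  let pre := buildPre elec
  let st := (PySem.List.pyRange 0 ((elec.length : Int) - 2) 1).foldl
    (fun (st : Option Int × Option Int) i =>
      let cost := PySem.List.pyGetD pre (i + 3) 0 - PySem.List.pyGetD pre i 0
      match st.1 with
      | none => (some cost, some i)
      | some b => if cost < b then (some cost, some i) else st)
    (none, none)
  st.2.getD 0  -- none would be Python's UnboundLocalError; excluded by Pre_

-- ===== PRECONDITION & SPEC =====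
-- On lists of fewer than 3 elements both A and B raise UnboundLocalError (the loop never runs).
def Pre_cheapest_3h (elec : List Int) : Prop := 3 ≤ elec.length
instance (elec : List Int) : Decidable (Pre_cheapest_3h elec) := by
  unfold Pre_cheapest_3h; infer_instance

def pvWitness_cheapest_3h : List Int := [5, 1, 4, 2]

def Spec_cheapest_3h (elec : List Int) (out : Int) : Prop := out = cheapest_3h_alt elec
instance (elec : List Int) (out : Int) : Decidable (Spec_cheapest_3h elec out) := by
  unfold Spec_cheapest_3h; infer_instance

-- ===== CLAIM (what is proved, stated in full; the proofs are below) =====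
def Claim_equal_cheapest_3h : Prop := ∀ (elec : List Int), Dom_cheapest_3h elec →
  Pre_cheapest_3h elec → Spec_cheapest_3h elec (cheapest_3h elec)

-- ===== LEMMAS AND PROOFS =====

-- partial sums starting after accumulated value s
def psums (s : Int) : List Int → List Int
  | [] => []
  | x :: xs => (s + x) :: psums (s + x) xs

lemma buildPre_go (l : List Int) : ∀ (acc : List Int) (s : Int),
    l.foldl (fun pre x => pre ++ [PySem.List.pyGetD pre (-1) 0 + x]) (acc ++ [s]) =
      (acc ++ [s]) ++ psums s l := by
  induction l with
  | nil => intro acc s; simp [psums]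
  | cons x xs ih =>
    intro acc s
    simp only [List.foldl_cons, PySem.List.pyGetD_neg_one_append_singleton, psums]
    have h := ih (acc ++ [s]) (s + x)
    rw [h]; simp

lemma buildPre_eq (elec : List Int) : buildPre elec = 0 :: psums 0 elec := by
  have h := buildPre_go elec [] 0
  simpa [buildPre] using h

lemma psums_getD (l : List Int) : ∀ (s : Int) (j : Nat), j < l.length →
    (psums s l).getD j 0 = s + (l.take (j + 1)).sum := by
  induction l with
  | nil => intro s j h; simp at h
  | cons x xs ih =>
    intro s j h
    cases j with
    | zero => simp [psums]
    | succ k =>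
      simp only [psums, List.getD_cons_succ, List.take_succ_cons, List.sum_cons]
      rw [ih (s + x) k (by simpa using h)]
      ring

lemma pre_getD (elec : List Int) (j : Nat) (hj : j ≤ elec.length) :
    (buildPre elec).getD j 0 = (elec.take j).sum := by
  rw [buildPre_eq]
  cases j with
  | zero => simp
  | succ k =>
    simp only [List.getD_cons_succ]
    rw [psums_getD elec 0 k (by omega)]
    simp

lemma window_eq (elec : List Int) (i : Nat) (hi : i + 3 ≤ elec.length) :
    (buildPre elec).getD (i + 3) 0 - (buildPre elec).getD i 0 =
      elec.getD i 0 + elec.getD (i + 1) 0 + elec.getD (i + 2) 0 := by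
  rw [pre_getD elec (i + 3) hi, pre_getD elec i (by omega)]
  rw [List.sum_take_succ elec (i + 2) (by omega),
      List.sum_take_succ elec (i + 1) (by omega),
      List.sum_take_succ elec i (by omega)]
  rw [List.getD_eq_getElem elec 0 (show i < elec.length by omega),
      List.getD_eq_getElem elec 0 (show i + 1 < elec.length by omega),
      List.getD_eq_getElem elec 0 (show i + 2 < elec.length by omega)]
  ring

-- after the first step, the two loops evolve identically
lemma loop_shift (c : Int → Int) (l : List Int) : ∀ (b : Int) (t : Option Int),
    l.foldl (fun (st : Option Int × Option Int) i =>
        match st.1 with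
        | none => (some (c i), some i)
        | some bb => if c i < bb then (some (c i), some i) else st) (some b, t) =
      (fun (p : Int × Option Int) => (some p.1, p.2))
        (l.foldl (fun (st : Int × Option Int) i =>
          if c i < st.1 then (c i, some i) else st) (b, t)) := by
  induction l with
  | nil => intro b t; rfl
  | cons x xs ih =>
    intro b t
    simp only [List.foldl_cons]
    by_cases h : c x < b
    · simp only [h, if_true]
      simpa using ih (c x) (some x)
    · simp only [h, if_false]
      simpa using ih b t

-- first iteration: A takes its first window (cost below the sentinel), B leaves None
lemma loop_main (c : Int → Int) (hd : Int) (l : List Int) (big : Int) (h : c hd < big) :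
    (((hd :: l).foldl (fun (st : Int × Option Int) i =>
        if c i < st.1 then (c i, some i) else st) (big, none)).2.getD 0 : Int) =
      (((hd :: l).foldl (fun (st : Option Int × Option Int) i =>
        match st.1 with
        | none => (some (c i), some i)
        | some b => if c i < b then (some (c i), some i) else st) (none, none)).2.getD 0) := by
  simp only [List.foldl_cons, if_pos h]
  rw [loop_shift c l (c hd) (some hd)]

lemma costB_eq_costA (elec : List Int) (i : Int)
    (hi : i ∈ PySem.List.pyRange 0 ((elec.length : Int) - 2) 1) :
    PySem.List.pyGetD (buildPre elec) (i + 3) 0 - PySem.List.pyGetD (buildPre elec) i 0 =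
      PySem.List.pyGetD elec i 0 + PySem.List.pyGetD elec (i + 1) 0 +
        PySem.List.pyGetD elec (i + 2) 0 := by
  rw [PySem.List.mem_pyRange_one] at hi
  obtain ⟨h0, h1⟩ := hi
  obtain ⟨k, rfl⟩ : ∃ k : Nat, i = (k : Int) := ⟨i.toNat, (Int.toNat_of_nonneg h0).symm⟩
  have hk : k + 3 ≤ elec.length := by omega
  have e3 : ((k : Int) + 3) = ((k + 3 : Nat) : Int) := by push_cast; ring
  have e1 : ((k : Int) + 1) = ((k + 1 : Nat) : Int) := by push_cast; ring
  have e2 : ((k : Int) + 2) = ((k + 2 : Nat) : Int) := by push_cast; ring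
  rw [e3, e1, e2, PySem.List.pyGetD_natCast, PySem.List.pyGetD_natCast,
    PySem.List.pyGetD_natCast, PySem.List.pyGetD_natCast, PySem.List.pyGetD_natCast]
  exact window_eq elec k hk

-- ===== VERDICT (by name: the statement is the Claim_ definition above) =====
theorem cheapest_3h_spec : Claim_equal_cheapest_3h := by
  intro elec hdom hpre
  unfold Spec_cheapest_3h cheapest_3h cheapest_3h_alt
  have hb : ∀ x ∈ elec, -2147483648 ≤ x ∧ x ≤ 2147483648 := by
    intro x hx
    have := List.all_eq_true.mp hdom x hx
    simpa [pvDomInt] using this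
  simp only []
  -- the running cost function of A
  set c : Int → Int := fun i => PySem.List.pyGetD elec i 0 + PySem.List.pyGetD elec (i + 1) 0 +
    PySem.List.pyGetD elec (i + 2) 0 with hc
  -- rewrite B's window costs (prefix-sum differences) into A's three-element sums
  have hcongr : (PySem.List.pyRange 0 ((elec.length : Int) - 2) 1).foldl
      (fun (st : Option Int × Option Int) i =>
        let cost := PySem.List.pyGetD (buildPre elec) (i + 3) 0 -
          PySem.List.pyGetD (buildPre elec) i 0
        match st.1 with
        | none => (some cost, some i)
        | some b => if cost < b then (some cost, some i) else st)
      (none, none) =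
    (PySem.List.pyRange 0 ((elec.length : Int) - 2) 1).foldl
      (fun (st : Option Int × Option Int) i =>
        match st.1 with
        | none => (some (c i), some i)
        | some b => if c i < b then (some (c i), some i) else st)
      (none, none) := by
    apply PySem.List.foldl_congr_mem
    intro acc i hi
    simp only [costB_eq_costA elec i hi, hc]
  rw [hcongr]
  have hlen : 3 ≤ elec.length := hpre
  have hlt : (0 : Int) < (elec.length : Int) - 2 := by omega
  rw [PySem.List.pyRange_one_cons hlt]
  -- within Dom every 3-hour window cost is far below A's sentinel
  have hA0 : c 0 < 100000000000 := by
    have g : ∀ j : Nat, j < elec.length →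
        -2147483648 ≤ elec.getD j 0 ∧ elec.getD j 0 ≤ 2147483648 := by
      intro j hj
      rw [List.getD_eq_getElem elec 0 hj]
      exact hb _ (List.getElem_mem hj)
    have g0 := g 0 (by omega); have g1 := g 1 (by omega); have g2 := g 2 (by omega)
    have hce : c 0 = elec.getD 0 0 + elec.getD 1 0 + elec.getD 2 0 := by
      simp [hc, pysem]
    omega
  exact loop_main c 0 _ 100000000000 hA0
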